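-- pv_equiv track=rewrite | github.com/StarsExpress/LeetCode-Repository | stack/max_min_product.py | find_max_min_product
-- ===== SOURCE A (Python) =====
-- def find_max_min_product(numbers: list[int]) -> int:  # LeetCode Q.1856.
--     """
--     Key: each number is the minimum of a certain range. Find out this range,
--     and multiply this number with range sum to find its min product.
--     """
--     prefix_sums, total_numbers = [], len(numbers)
--
--     next_smaller_indices: list[int | None] = [None] * total_numbers
--     stack = [(0, numbers[0])]  # Increasing monotonic stack: (idx, number).
--
--     for current_idx, number in enumerate(numbers):
--         if current_idx == 0:  # 1st number.
--             prefix_sums.append(number)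
--             continue
--
--         # Past number > current number: next smaller found.
--         while stack and stack[-1][1] > number:
--             past_idx, _ = stack.pop(-1)
--             next_smaller_indices[past_idx] = current_idx
--
--         stack.append((current_idx, number))
--         prefix_sums.append(prefix_sums[-1] + number)
--
--     last_smaller_indices: list[int | None] = [None] * total_numbers
--     stack.clear()
--     stack.append((-1, numbers[-1]))  # Increasing monotonic stack: (idx, number).
--
--     for reverse_idx, number in enumerate(numbers[::-1]):  # Backward iteration.
--         if reverse_idx > 0:  # Not the last number.
--             current_idx = total_numbers - 1 - reverse_idx
--             # Future number > current number: last smaller found.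
--             while stack and stack[-1][1] > number:
--                 future_idx, _ = stack.pop(-1)
--                 last_smaller_indices[future_idx] = current_idx
--
--             stack.append((current_idx, number))
--
--     max_min_product = -float("inf")
--     for idx, number in enumerate(numbers):
--         subarray_sum = number
--
--         next_smaller_idx = next_smaller_indices[idx]
--         if next_smaller_idx is not None:  # All the way to (next smaller idx - 1)th number.
--             subarray_sum += prefix_sums[next_smaller_idx - 1] - prefix_sums[idx]
--
--         else:  # All the way to the rightmost number.
--             subarray_sum += prefix_sums[-1] - prefix_sums[idx]
--
--         last_smaller_idx = last_smaller_indices[idx]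
--         if last_smaller_idx is not None:  # All the way to (last smaller idx + 1)th number.
--             subarray_sum += prefix_sums[idx - 1] - prefix_sums[last_smaller_idx]
--
--         if idx > 0 and last_smaller_idx is None:
--             # Current number isn't the 1st number and doesn't have a last smaller number.
--             subarray_sum += prefix_sums[idx - 1]
--
--         min_product = number * subarray_sum
--         if min_product > max_min_product:
--             max_min_product = min_product
--
--     return max_min_product % (10 ** 9 + 7)  # Required to control size.
-- ===== SOURCE B (Python) =====
-- def find_max_min_product(numbers: list[int]) -> int:  # LeetCode Q.1856.
--     """Nearest-smaller neighbours by pointer chasing (no stacks): nxt[i] /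
--     prv[i] are found by jumping through already-computed answers, then one
--     prefix-sum table gives each element's span sum directly.
--     Raises ValueError on an empty list (A raises IndexError there)."""
--     n = len(numbers)
--     nxt = [n] * n  # nearest index to the right with a strictly smaller value, n if none
--     for i in reversed(range(n - 1)):
--         j = i + 1
--         while j < n and numbers[j] >= numbers[i]:
--             j = nxt[j]
--         nxt[i] = j
--     prv = [-1] * n  # nearest index to the left with a strictly smaller value, -1 if none
--     for i in range(1, n):
--         j = i - 1
--         while j >= 0 and numbers[j] >= numbers[i]:
--             j = prv[j]
--         prv[i] = j
--     prefix = [0]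
--     for v in numbers:
--         prefix.append(prefix[-1] + v)
--     best = max(numbers[i] * (prefix[nxt[i]] - prefix[prv[i] + 1]) for i in range(n))
--     return best % (10 ** 9 + 7)
-- ===== Notes on version B (the rewrite author's own statement) =====
-- stated objective: alternative
-- what changed: Replaces A's two monotonic (index,value) stacks (one forward pass, one over the reversed list with a -1-index sentinel) plus a final table-reconstruction loop with stack-free pointer-chasing: nxt[i]/prv[i] nearest-strictly-smaller tables are filled by jumping through already-computed entries, and one prefix-sum subtraction gives each element's span product directly.
import Mathlib
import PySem

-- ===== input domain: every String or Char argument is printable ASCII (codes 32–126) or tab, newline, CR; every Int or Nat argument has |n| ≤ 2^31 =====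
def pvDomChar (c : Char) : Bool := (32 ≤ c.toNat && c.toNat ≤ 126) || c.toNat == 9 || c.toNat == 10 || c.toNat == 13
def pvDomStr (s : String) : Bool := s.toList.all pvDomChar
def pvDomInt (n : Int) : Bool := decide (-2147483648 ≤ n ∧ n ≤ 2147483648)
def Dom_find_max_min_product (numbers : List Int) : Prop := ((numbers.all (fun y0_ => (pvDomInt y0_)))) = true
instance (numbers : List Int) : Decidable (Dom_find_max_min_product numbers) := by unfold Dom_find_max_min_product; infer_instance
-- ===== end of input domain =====

-- B replaces A's two monotonic index stacks (forward + reversed pass) and the final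
-- table-reconstruction branches by pointer-chasing nearest-smaller tables and one
-- prefix-sum formula per element; return value only, neither side mutates its input.

-- ===== PORT A =====
-- Python stack (append / pop(-1) at the end) is represented with its TOP AT THE HEAD
-- of the Lean list, so `stack[-1]` is the head, `append` is cons, `pop(-1)` is tail.
-- `while stack and stack[-1][1] > number: past,_ = stack.pop(-1); tbl[past] = current`
def popSmaller (v c : Int) : List (Option Int) → List (Int × Int) → List (Option Int) × List (Int × Int)
  | tbl, [] => (tbl, [])
  | tbl, (i, x) :: rest =>
      if x > v then popSmaller v c (PySem.List.pySetD tbl i (some c)) rest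
      else (tbl, (i, x) :: rest)

-- one iteration of A's first loop, state = (prefix_sums, next_smaller_indices, stack)
def fwdStep (st : List Int × List (Option Int) × List (Int × Int)) (p : Int × Int) :
    List Int × List (Option Int) × List (Int × Int) :=
  let (pre, tbl, stack) := st
  let (idx, v) := p
  if idx = 0 then (pre ++ [v], tbl, stack)
  else
    let (tbl', stack') := popSmaller v idx tbl stack
    (pre ++ [PySem.List.pyGetD pre (-1) 0 + v], tbl', (idx, v) :: stack')

-- one iteration of A's second (backward) loop, state = (last_smaller_indices, stack)
def bwdStep (n : Int) (st : List (Option Int) × List (Int × Int)) (p : Int × Int) :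
    List (Option Int) × List (Int × Int) :=
  let (tbl, stack) := st
  let (ridx, v) := p
  if ridx > 0 then
    let c := n - 1 - ridx
    let (tbl', stack') := popSmaller v c tbl stack
    (tbl', (c, v) :: stack')
  else st

-- one iteration of A's final loop; acc none = -float("inf")
def finalStep (pre : List Int) (nextT lastT : List (Option Int)) (acc : Option Int) (p : Int × Int) : Option Int :=
  let (idx, v) := p
  let ns := PySem.List.pyGetD nextT idx none
  let s1 := match ns with
    | some nsi => v + (PySem.List.pyGetD pre (nsi - 1) 0 - PySem.List.pyGetD pre idx 0)
    | none => v + (PySem.List.pyGetD pre (-1) 0 - PySem.List.pyGetD pre idx 0)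
  let ls := PySem.List.pyGetD lastT idx none
  let s2 := match ls with
    | some lsi => s1 + (PySem.List.pyGetD pre (idx - 1) 0 - PySem.List.pyGetD pre lsi 0)
    | none => s1
  let s3 := if idx > 0 ∧ ls = none then s2 + PySem.List.pyGetD pre (idx - 1) 0 else s2
  let mp := v * s3
  match acc with
  | none => some mp
  | some m => if mp > m then some mp else some m

def find_max_min_product (numbers : List Int) : Int :=
  let n : Int := PySem.List.len numbers
  let tbl0 : List (Option Int) := List.replicate n.toNat none       -- [None] * total_numbers
  let stack0 : List (Int × Int) := [(0, PySem.List.pyGetD numbers 0 0)]   -- first element: IndexError on the empty list (excluded by Pre_)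
  let r1 := (PySem.List.enumerate numbers).foldl fwdStep (([] : List Int), tbl0, stack0)
  let pre := r1.1
  let nextT := r1.2.1
  -- numbers[::-1]: slice? with step -1 is `some xs.reverse` (PySem.List.slice?_none_none_neg_one)
  let rev := ((PySem.List.slice? numbers none none (-1)).getD [])
  let stackB : List (Int × Int) := [(-1, PySem.List.pyGetD numbers (-1) 0)]
  let r2 := (PySem.List.enumerate rev).foldl (bwdStep n) (tbl0, stackB)
  let lastT := r2.1
  let res := (PySem.List.enumerate numbers).foldl (finalStep pre nextT lastT) none
  match res with
  | some m => PySem.Int.mod m 1000000007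
  | none => 0        -- unreachable under Pre_ (A raises IndexError on [])

-- ===== PORT B =====
-- `j = i + 1; while j < n and numbers[j] >= numbers[i]: j = nxt[j]`
-- (fuel numbers.length bounds the loop; j strictly increases, so it always suffices)
def chaseR (a : List Int) (vi : Int) (nxt : List Nat) : Nat → Nat → Nat
  | 0, j => j
  | f + 1, j => if j < a.length ∧ vi ≤ a.getD j 0 then chaseR a vi nxt f (nxt.getD j 0) else j

def buildNxt (a : List Int) : List Nat :=
  (List.range (a.length - 1)).reverse.foldl
    (fun nxt i => nxt.set i (chaseR a (a.getD i 0) nxt a.length (i + 1)))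
    (List.replicate a.length a.length)

-- `j = i - 1; while j >= 0 and numbers[j] >= numbers[i]: j = prv[j]`
def chaseL (a : List Int) (vi : Int) (prv : List Int) : Nat → Int → Int
  | 0, j => j
  | f + 1, j => if 0 ≤ j ∧ vi ≤ a.getD j.toNat 0 then chaseL a vi prv f (prv.getD j.toNat (-1)) else j

def buildPrv (a : List Int) : List Int :=
  (List.range' 1 (a.length - 1)).foldl
    (fun prv i => prv.set i (chaseL a (a.getD i 0) prv a.length ((i : Int) - 1)))
    (List.replicate a.length (-1))

-- the prefix-sum list, built by appending prefix[-1] + v for each v in numbers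
def buildPre (a : List Int) : List Int :=
  a.foldl (fun pre v => pre ++ [PySem.List.pyGetD pre (-1) 0 + v]) [0]

def find_max_min_product_alt (numbers : List Int) : Int :=
  let n := numbers.length
  let nxt := buildNxt numbers
  let prv := buildPrv numbers
  let pre := buildPre numbers
  let cands := (List.range n).map (fun i =>
    numbers.getD i 0 * (pre.getD (nxt.getD i 0) 0 - PySem.List.pyGetD pre (prv.getD i (-1) + 1) 0))
  match PySem.List.max? cands (fun x => x) with
  | some m => PySem.Int.mod m 1000000007
  | none => 0        -- unreachable under Pre_ (Python's max raises ValueError on an empty sequence)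

-- ===== PRECONDITION & SPEC =====
-- A unconditionally reads the first element, so it raises IndexError on the empty list.
def Pre_find_max_min_product (numbers : List Int) : Prop := numbers ≠ []
instance (numbers : List Int) : Decidable (Pre_find_max_min_product numbers) := by
  unfold Pre_find_max_min_product; infer_instance

def pvWitness_find_max_min_product : List Int := [2, 3, 1]

def Spec_find_max_min_product (numbers : List Int) (out : Int) : Prop := out = find_max_min_product_alt numbers
instance (numbers : List Int) (out : Int) : Decidable (Spec_find_max_min_product numbers out) := by unfold Spec_find_max_min_product; infer_instance

-- ===== CLAIM (what is proved, stated in full; the proofs are below) =====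
def Claim_equal_find_max_min_product : Prop := ∀ (numbers : List Int), Dom_find_max_min_product numbers → Pre_find_max_min_product numbers → Spec_find_max_min_product numbers (find_max_min_product numbers)

-- ===== LEMMAS AND PROOFS =====


-- canonical spec: prefix sums and nearest strictly-smaller neighbours
def S (a : List Int) (m : Nat) : Int := (a.take m).sum

-- first k ≥ j with a[k] < v, else a.length
def specNgo (a : List Int) (v : Int) (j : Nat) : Nat :=
  if h : j < a.length then (if a.getD j 0 < v then j else specNgo a v (j + 1)) else j
termination_by a.length - j

def specN (a : List Int) (i : Nat) : Nat := specNgo a (a.getD i 0) (i + 1)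

-- greatest k < t with a[k] < v, else -1
def specPgo (a : List Int) (v : Int) : Nat → Int
  | 0 => -1
  | t + 1 => if a.getD t 0 < v then (t : Int) else specPgo a v t

def specP (a : List Int) (i : Nat) : Int := specPgo a (a.getD i 0) i

def cand (a : List Int) (i : Nat) : Int :=
  a.getD i 0 * (S a (specN a i) - S a (specP a i + 1).toNat)

theorem ngo_ge (a : List Int) (v : Int) (j : Nat) : j ≤ specNgo a v j := by
  fun_induction specNgo a v j with
  | case1 => omega
  | case2 _ _ _ ih => omega
  | case3 => omega

theorem ngo_le (a : List Int) (v : Int) (j : Nat) (h : j ≤ a.length) : specNgo a v j ≤ a.length := by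
  fun_induction specNgo a v j with
  | case1 => omega
  | case2 j h1 h2 ih => exact ih (by omega)
  | case3 => omega

theorem ngo_between (a : List Int) (v : Int) (j : Nat) :
    ∀ k, j ≤ k → k < specNgo a v j → ¬ (a.getD k 0 < v) := by
  fun_induction specNgo a v j with
  | case1 j h1 h2 => omega
  | case2 j h1 h2 ih =>
    intro k hk1 hk2
    rcases Nat.eq_or_lt_of_le hk1 with rfl | h
    · exact h2
    · exact ih k h hk2
  | case3 j h1 => omega

theorem ngo_at (a : List Int) (v : Int) (j : Nat) (h : specNgo a v j < a.length) :
    a.getD (specNgo a v j) 0 < v := by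
  fun_induction specNgo a v j with
  | case1 j h1 h2 => exact h2
  | case2 j h1 h2 ih => exact ih h
  | case3 j h1 => omega

theorem ngo_eq (a : List Int) (v : Int) (j m : Nat) (h1 : j ≤ m) (h2 : m ≤ a.length)
    (hb : ∀ k, j ≤ k → k < m → ¬ (a.getD k 0 < v)) (hm : m = a.length ∨ a.getD m 0 < v) :
    specNgo a v j = m := by
  rcases Nat.lt_trichotomy (specNgo a v j) m with h | h | h
  · exact absurd (ngo_at a v j (by omega)) (hb _ (ngo_ge a v j) h)
  · exact h
  · rcases hm with rfl | hm
    · have := ngo_le a v j (by omega)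
      omega
    · exact absurd hm (ngo_between a v j m (by omega) h)

theorem pgo_lt (a : List Int) (v : Int) (t : Nat) : specPgo a v t < (t : Int) := by
  induction t with
  | zero => simp [specPgo]
  | succ t ih =>
    simp only [specPgo]
    split
    · omega
    · push_cast; omega

theorem pgo_ge (a : List Int) (v : Int) (t : Nat) : -1 ≤ specPgo a v t := by
  induction t with
  | zero => simp [specPgo]
  | succ t ih =>
    simp only [specPgo]
    split
    · omega
    · exact ih

theorem pgo_between (a : List Int) (v : Int) (t : Nat) :
    ∀ k : Nat, k < t → specPgo a v t < (k : Int) → ¬ (a.getD k 0 < v) := by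
  induction t with
  | zero => omega
  | succ t ih =>
    simp only [specPgo]
    split
    · intro k hk1 hk2; omega
    · intro k hk1 hk2
      rcases Nat.lt_succ_iff_lt_or_eq.mp hk1 with h | rfl
      · exact ih k h hk2
      · assumption
    

theorem pgo_at (a : List Int) (v : Int) (t : Nat) (h : 0 ≤ specPgo a v t) :
    a.getD (specPgo a v t).toNat 0 < v ∧ ((specPgo a v t).toNat < t) := by
  induction t with
  | zero => simp [specPgo] at h
  | succ t ih =>
    by_cases hlt : a.getD t 0 < v
    · simp only [specPgo, if_pos hlt, Int.toNat_natCast]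
      exact ⟨hlt, by omega⟩
    · simp only [specPgo, if_neg hlt] at h ⊢
      obtain ⟨h1, h2⟩ := ih h
      exact ⟨h1, by omega⟩

theorem pgo_eq (a : List Int) (v : Int) (t : Nat) (m : Int) (h1 : -1 ≤ m) (h2 : m < (t : Int))
    (hb : ∀ k : Nat, k < t → m < (k : Int) → ¬ (a.getD k 0 < v))
    (hm : m = -1 ∨ (0 ≤ m ∧ a.getD m.toNat 0 < v)) : specPgo a v t = m := by
  rcases lt_trichotomy (specPgo a v t) m with h | h | h
  · rcases hm with rfl | ⟨hm0, hma⟩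
    · exact absurd (pgo_ge a v t) (by omega)
    · exact absurd hma (pgo_between a v t m.toNat (by omega) (by omega))
  · exact h
  · have h0 : 0 ≤ specPgo a v t := by omega
    obtain ⟨ha1, ha2⟩ := pgo_at a v t h0
    have hb2 := hb (specPgo a v t).toNat ha2 (by omega)
    exact absurd ha1 hb2


theorem specN_gt (a : List Int) (i : Nat) : i < specN a i := ngo_ge a (a.getD i 0) (i + 1)

theorem specN_le (a : List Int) (i : Nat) (h : i < a.length) : specN a i ≤ a.length :=
  ngo_le a (a.getD i 0) (i + 1) h

theorem specN_between (a : List Int) (i : Nat) :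
    ∀ k, i < k → k < specN a i → a.getD i 0 ≤ a.getD k 0 := by
  intro k h1 h2
  exact not_lt.mp (ngo_between a (a.getD i 0) (i + 1) k h1 h2)

theorem specN_at (a : List Int) (i : Nat) (h : specN a i < a.length) :
    a.getD (specN a i) 0 < a.getD i 0 := ngo_at a (a.getD i 0) (i + 1) h

theorem specN_eq (a : List Int) (i m : Nat) (h1 : i < m) (h2 : m ≤ a.length)
    (hb : ∀ k, i < k → k < m → a.getD i 0 ≤ a.getD k 0)
    (hm : m = a.length ∨ a.getD m 0 < a.getD i 0) : specN a i = m :=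
  ngo_eq a (a.getD i 0) (i + 1) m h1 h2 (fun k hk1 hk2 => not_lt.mpr (hb k hk1 hk2)) hm

theorem specN_le_of (a : List Int) (i k : Nat) (hik : i < k) (hk : a.getD k 0 < a.getD i 0) :
    specN a i ≤ k := by
  by_contra h
  exact absurd hk (not_lt.mpr (specN_between a i k hik (by omega)))

theorem specP_lt (a : List Int) (i : Nat) : specP a i < (i : Int) := pgo_lt a (a.getD i 0) i

theorem specP_ge (a : List Int) (i : Nat) : -1 ≤ specP a i := pgo_ge a (a.getD i 0) i

theorem specP_between (a : List Int) (i : Nat) :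
    ∀ k : Nat, k < i → specP a i < (k : Int) → a.getD i 0 ≤ a.getD k 0 := by
  intro k h1 h2
  exact not_lt.mp (pgo_between a (a.getD i 0) i k h1 h2)

theorem specP_at (a : List Int) (i : Nat) (h : 0 ≤ specP a i) :
    a.getD (specP a i).toNat 0 < a.getD i 0 ∧ (specP a i).toNat < i := pgo_at a (a.getD i 0) i h

theorem specP_eq (a : List Int) (i : Nat) (m : Int) (h1 : -1 ≤ m) (h2 : m < (i : Int))
    (hb : ∀ k : Nat, k < i → m < (k : Int) → a.getD i 0 ≤ a.getD k 0)
    (hm : m = -1 ∨ (0 ≤ m ∧ a.getD m.toNat 0 < a.getD i 0)) : specP a i = m :=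
  pgo_eq a (a.getD i 0) i m h1 h2 (fun k hk1 hk2 => not_lt.mpr (hb k hk1 hk2)) hm

theorem specP_ge_of (a : List Int) (i k : Nat) (hik : k < i) (hk : a.getD k 0 < a.getD i 0) :
    (k : Int) ≤ specP a i := by
  by_contra h
  exact absurd hk (not_lt.mpr (specP_between a i k hik (by omega)))

theorem S_succ (a : List Int) (m : Nat) (h : m < a.length) :
    S a (m + 1) = S a m + a.getD m 0 := by
  simp only [S, List.take_add_one, List.getElem?_eq_getElem h, Option.toList_some,
    List.sum_append, List.sum_cons, List.sum_nil, List.getD, Option.getD_some, add_zero]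

theorem getD_map_range {β : Type} (f : Nat → β) (n m : Nat) (d : β) (h : m < n) :
    ((List.range n).map f).getD m d = f m := by
  simp [List.getD, h]

theorem mem_dropWhile_iff_pw {α : Type} (q : α → Bool) :
    ∀ (l : List α), l.Pairwise (fun x y => q y = true → q x = true) →
      ∀ x, (x ∈ l.dropWhile q ↔ x ∈ l ∧ q x = false) := by
  intro l
  induction l with
  | nil => simp
  | cons z t ih =>
    intro hpw x
    obtain ⟨hz, ht⟩ := List.pairwise_cons.mp hpw
    by_cases hq : q z
    · rw [List.dropWhile_cons_of_pos hq, ih ht x]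
      constructor
      · rintro ⟨h1, h2⟩; exact ⟨List.mem_cons_of_mem z h1, h2⟩
      · rintro ⟨h1, h2⟩
        rcases List.mem_cons.mp h1 with rfl | h1
        · rw [hq] at h2; cases h2
        · exact ⟨h1, h2⟩
    · rw [List.dropWhile_cons_of_neg hq]
      constructor
      · intro hx
        refine ⟨hx, ?_⟩
        rcases List.mem_cons.mp hx with rfl | hx
        · simpa using hq
        · by_contra hc
          exact hq (hz x hx (by simpa using hc))
      · exact fun h => h.1

theorem mem_takeWhile_iff_pw {α : Type} (q : α → Bool) (l : List α)
    (hpw : l.Pairwise (fun x y => q y = true → q x = true)) (x : α) :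
    x ∈ l.takeWhile q ↔ x ∈ l ∧ q x = true := by
  constructor
  · intro hx
    exact ⟨List.IsPrefix.mem hx (List.takeWhile_prefix q), List.mem_takeWhile_imp hx⟩
  · rintro ⟨h1, h2⟩
    rw [← List.takeWhile_append_dropWhile (p := q) (l := l)] at h1
    rcases List.mem_append.mp h1 with h | h
    · exact h
    · rw [mem_dropWhile_iff_pw q l hpw x] at h
      rw [h.2] at h2; cases h2

theorem length_foldl_set {α : Type} (w : α) :
    ∀ (L : List Nat) (tbl : List α), (L.foldl (fun t k => t.set k w) tbl).length = tbl.length := by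
  intro L
  induction L with
  | nil => simp
  | cons k L ih => intro tbl; simp [List.foldl_cons, ih]

theorem getD_foldl_set {α : Type} (w : α) :
    ∀ (L : List Nat) (tbl : List α) (i : Nat) (d : α), (∀ k ∈ L, k < tbl.length) →
      ((L.foldl (fun t k => t.set k w) tbl).getD i d) = if i ∈ L then w else tbl.getD i d := by
  intro L
  induction L with
  | nil => simp
  | cons k L ih =>
    intro tbl i d hlen
    rw [List.foldl_cons, ih (tbl.set k w) i d (by simpa using fun k hk => hlen k (List.mem_cons_of_mem _ hk))]
    by_cases hi : i ∈ L
    · simp [hi]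
    · simp only [if_false, List.mem_cons, hi, or_false]
      by_cases hik : i = k
      · subst hik
        simp [List.getD, hlen i (List.mem_cons_self)]
      · simp only [List.getD]
        rw [List.getElem?_set_ne (by omega), if_neg hik]


theorem getD_set {α : Type} (l : List α) (k i : Nat) (w d : α) (hk : k < l.length) :
    (l.set k w).getD i d = if i = k then w else l.getD i d := by
  by_cases hik : i = k
  · subst hik
    simp [List.getD, hk]
  · simp only [List.getD, if_neg hik]
    rw [List.getElem?_set_ne (by omega)]

theorem specN_last (a : List Int) (ha : a ≠ []) : specN a (a.length - 1) = a.length := by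
  have h1 : a.length - 1 + 1 = a.length := by
    have := List.length_pos_iff.mpr ha; omega
  rw [specN, h1, specNgo]
  simp

theorem buildPre_eq (a : List Int) : buildPre a = (List.range (a.length + 1)).map (S a) := by
  induction a using List.reverseRecOn with
  | nil => simp [buildPre, S]
  | append_singleton as x ih =>
    have hstep : buildPre (as ++ [x]) =
        buildPre as ++ [PySem.List.pyGetD (buildPre as) (-1) 0 + x] := by
      rw [buildPre, List.foldl_append, List.foldl_cons, List.foldl_nil, ← buildPre]
    rw [hstep, ih]
    have hlast : PySem.List.pyGetD ((List.range (as.length + 1)).map (S as)) (-1) 0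
        = S as as.length := by
      rw [List.range_succ, List.map_append, List.map_cons, List.map_nil,
        PySem.List.pyGetD_neg_one_append_singleton]
    rw [hlast]
    have hcongr : (List.range (as.length + 1)).map (S (as ++ [x]))
        = (List.range (as.length + 1)).map (S as) := by
      apply List.map_congr_left
      intro m hm
      rw [List.mem_range] at hm
      unfold S
      rw [List.take_append_of_le_length (by omega)]
    have hsum : S (as ++ [x]) (as.length + 1) = S as as.length + x := by
      unfold S
      rw [List.take_of_length_le (by simp), List.take_of_length_le (by omega), List.sum_append]
      simp
    rw [List.length_append, List.length_singleton, List.range_succ (n := as.length + 1),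
      List.map_append, hcongr, List.map_cons, List.map_nil, hsum]

def buildNxtPart (a : List Int) (t : Nat) : List Nat :=
  ((List.range (a.length - 1)).reverse.take t).foldl
    (fun nxt i => nxt.set i (chaseR a (a.getD i 0) nxt a.length (i + 1)))
    (List.replicate a.length a.length)

theorem reverse_range_take_succ (m t : Nat) (h : t < m) :
    (List.range m).reverse.take (t + 1) = (List.range m).reverse.take t ++ [m - 1 - t] := by
  rw [List.take_add_one]
  have hlen : t < (List.range m).reverse.length := by simpa using h
  rw [List.getElem?_eq_getElem hlen]
  simp [List.getElem_reverse]

theorem chaseR_spec (a : List Int) (i : Nat) (hi : i < a.length) (tbl : List Nat)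
    (htbl : ∀ k, i < k → k < a.length → tbl.getD k 0 = specN a k) :
    ∀ (f j : Nat), i < j → j ≤ specN a i → specN a i - j ≤ f →
      chaseR a (a.getD i 0) tbl f j = specN a i := by
  intro f
  induction f with
  | zero =>
    intro j h1 h2 h3
    have : j = specN a i := by omega
    subst this
    rfl
  | succ f ih =>
    intro j h1 h2 h3
    by_cases hj : j = specN a i
    · subst hj
      rw [chaseR, if_neg]
      rintro ⟨hl, hv⟩
      exact absurd (specN_at a i hl) (by omega)
    · have hjlt : j < specN a i := by omega
      have hjn : j < a.length := lt_of_lt_of_le hjlt (specN_le a i hi)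
      have hva : a.getD i 0 ≤ a.getD j 0 := specN_between a i j h1 hjlt
      rw [chaseR, if_pos ⟨hjn, hva⟩, htbl j h1 hjn]
      have hgt : j < specN a j := specN_gt a j
      have hle : specN a j ≤ specN a i := by
        rcases Nat.lt_or_ge (specN a i) a.length with hc | hc
        · exact specN_le_of a j (specN a i) hjlt (lt_of_lt_of_le (specN_at a i hc) hva)
        · have := specN_le a j hjn
          omega
      exact ih (specN a j) (by omega) hle (by omega)

theorem nxtPart_inv (a : List Int) (t : Nat) (ht : t ≤ a.length - 1) :
    (buildNxtPart a t).length = a.length ∧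
      (∀ k, k < a.length → (buildNxtPart a t).getD k 0 =
        if a.length - 1 - t ≤ k then specN a k else a.length) := by
  induction t with
  | zero =>
    refine ⟨by simp [buildNxtPart], ?_⟩
    intro k hk
    rw [buildNxtPart]
    simp only [List.take_zero, List.foldl_nil]
    rw [List.getD, List.getElem?_replicate, if_pos hk]
    by_cases hc : a.length - 1 - 0 ≤ k
    · have hk1 : k = a.length - 1 := by omega
      subst hk1
      rw [if_pos (by omega), specN_last a (by rw [← List.length_pos_iff]; omega)]
      rfl
    · rw [if_neg hc]
      rfl
  | succ t ih =>
    obtain ⟨ihl, ihv⟩ := ih (by omega)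
    have hc : a.length - 2 - t < a.length := by omega
    have hstep : buildNxtPart a (t + 1) =
        (buildNxtPart a t).set (a.length - 2 - t)
          (chaseR a (a.getD (a.length - 2 - t) 0) (buildNxtPart a t) a.length (a.length - 2 - t + 1)) := by
      rw [buildNxtPart, buildNxtPart, reverse_range_take_succ _ t (by omega), List.foldl_append]
      norm_num
      congr 2
    have hchase : chaseR a (a.getD (a.length - 2 - t) 0) (buildNxtPart a t) a.length
        (a.length - 2 - t + 1) = specN a (a.length - 2 - t) := by
      apply chaseR_spec a _ hc (buildNxtPart a t)
        (fun k hk1 hk2 => by rw [ihv k hk2, if_pos (by omega)])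
      · omega
      · exact specN_gt a _
      · have := specN_le a (a.length - 2 - t) hc; omega
    rw [hstep, hchase]
    refine ⟨by simpa using ihl, ?_⟩
    intro k hk
    rw [getD_set _ _ _ _ _ (by omega)]
    by_cases hkc : k = a.length - 2 - t
    · subst hkc
      rw [if_pos rfl, if_pos (by omega)]
    · rw [if_neg hkc, ihv k hk]
      by_cases h1 : a.length - 1 - t ≤ k
      · rw [if_pos h1, if_pos (by omega)]
      · rw [if_neg h1, if_neg (by omega)]

theorem buildNxt_spec (a : List Int) (k : Nat) (hk : k < a.length) :
    (buildNxt a).getD k 0 = specN a k := by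
  have h : buildNxt a = buildNxtPart a (a.length - 1) := by
    rw [buildNxt, buildNxtPart, List.take_of_length_le (by simp)]
  rw [h, (nxtPart_inv a (a.length - 1) le_rfl).2 k hk, if_pos (by omega)]


theorem chaseL_spec (a : List Int) (i : Nat) (_hi : i < a.length) (tbl : List Int)
    (htbl : ∀ k : Nat, k < i → tbl.getD k (-1) = specP a k) :
    ∀ (f : Nat) (j : Int), j < (i : Int) → specP a i ≤ j → (j - specP a i).toNat ≤ f →
      chaseL a (a.getD i 0) tbl f j = specP a i := by
  intro f
  induction f with
  | zero =>
    intro j h1 h2 h3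
    have : j = specP a i := by omega
    rw [this, chaseL]
  | succ f ih =>
    intro j h1 h2 h3
    by_cases hj : j = specP a i
    · subst hj
      rw [chaseL, if_neg]
      rintro ⟨h0, hv⟩
      exact absurd (specP_at a i h0).1 (not_lt.mpr hv)
    · have hgt : specP a i < j := lt_of_le_of_ne h2 (Ne.symm hj)
      have h0 : 0 ≤ j := by have := specP_ge a i; omega
      have hk : j.toNat < i := by omega
      have hva : a.getD i 0 ≤ a.getD j.toNat 0 := specP_between a i j.toNat hk (by omega)
      rw [chaseL, if_pos ⟨h0, hva⟩, htbl j.toNat hk]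
      have hlt : specP a j.toNat < j := by
        have := specP_lt a j.toNat; omega
      have hge : specP a i ≤ specP a j.toNat := by
        by_cases h2' : 0 ≤ specP a i
        · obtain ⟨hat, hlt2⟩ := specP_at a i h2'
          have hlt3 : a.getD (specP a i).toNat 0 < a.getD j.toNat 0 := lt_of_lt_of_le hat hva
          have := specP_ge_of a j.toNat (specP a i).toNat (by omega) hlt3
          omega
        · have := specP_ge a i
          have := specP_ge a j.toNat
          omega
      exact ih (specP a j.toNat) (by omega) hge (by omega)

def buildPrvPart (a : List Int) (t : Nat) : List Int :=
  ((List.range' 1 (a.length - 1)).take t).foldl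
    (fun prv i => prv.set i (chaseL a (a.getD i 0) prv a.length ((i : Int) - 1)))
    (List.replicate a.length (-1))

theorem range'_take_succ (m t : Nat) (h : t < m) :
    (List.range' 1 m).take (t + 1) = (List.range' 1 m).take t ++ [t + 1] := by
  rw [List.take_add_one]
  have hlen : t < (List.range' 1 m).length := by simpa using h
  rw [List.getElem?_eq_getElem hlen]
  simp [List.getElem_range', Nat.add_comm]

theorem prvPart_inv (a : List Int) (t : Nat) (ht : t ≤ a.length - 1) :
    (buildPrvPart a t).length = a.length ∧
      (∀ k, k < a.length → (buildPrvPart a t).getD k (-1) =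
        if k ≤ t then specP a k else -1) := by
  induction t with
  | zero =>
    refine ⟨by simp [buildPrvPart], ?_⟩
    intro k hk
    rw [buildPrvPart]
    simp only [List.take_zero, List.foldl_nil]
    rw [List.getD, List.getElem?_replicate, if_pos hk]
    by_cases hc : k ≤ 0
    · have : k = 0 := by omega
      subst this
      rw [if_pos le_rfl]
      simp [specP, specPgo]
    · rw [if_neg hc]
      rfl
  | succ t ih =>
    obtain ⟨ihl, ihv⟩ := ih (by omega)
    have hc : t + 1 < a.length := by omega
    have hstep : buildPrvPart a (t + 1) =
        (buildPrvPart a t).set (t + 1)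
          (chaseL a (a.getD (t + 1) 0) (buildPrvPart a t) a.length (((t + 1 : Nat) : Int) - 1)) := by
      rw [buildPrvPart, buildPrvPart, range'_take_succ _ t (by omega), List.foldl_append]
      simp
    have hchase : chaseL a (a.getD (t + 1) 0) (buildPrvPart a t) a.length (((t + 1 : Nat) : Int) - 1)
        = specP a (t + 1) := by
      apply chaseL_spec a (t + 1) hc (buildPrvPart a t)
        (fun k hk1 => by rw [ihv k (by omega), if_pos (by omega)])
      · push_cast; omega
      · have := specP_lt a (t + 1); push_cast at this ⊢; omega
      · have := specP_ge a (t + 1); omega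
    rw [hstep, hchase]
    refine ⟨by simpa using ihl, ?_⟩
    intro k hk
    rw [getD_set _ _ _ _ _ (by omega)]
    by_cases hkc : k = t + 1
    · subst hkc
      rw [if_pos rfl, if_pos le_rfl]
    · rw [if_neg hkc, ihv k hk]
      by_cases h1 : k ≤ t
      · rw [if_pos h1, if_pos (by omega)]
      · rw [if_neg h1, if_neg (by omega)]

theorem buildPrv_spec (a : List Int) (k : Nat) (hk : k < a.length) :
    (buildPrv a).getD k (-1) = specP a k := by
  have h : buildPrv a = buildPrvPart a (a.length - 1) := by
    rw [buildPrv, buildPrvPart, List.take_of_length_le (by simp)]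
  rw [h, (prvPart_inv a (a.length - 1) le_rfl).2 k hk, if_pos (by omega)]


theorem alt_eq (a : List Int) (m : Nat) (hm : a.length = m + 1) :
    find_max_min_product_alt a =
      PySem.Int.mod (((List.range m).map (fun k => cand a (k + 1))).foldl max (cand a 0))
        1000000007 := by
  rw [find_max_min_product_alt]
  have hcands : (List.range a.length).map (fun i =>
      a.getD i 0 * ((buildPre a).getD ((buildNxt a).getD i 0) 0 -
        PySem.List.pyGetD (buildPre a) ((buildPrv a).getD i (-1) + 1) 0))
      = (List.range a.length).map (cand a) := by
    apply List.map_congr_left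
    intro i hi
    rw [List.mem_range] at hi
    rw [buildNxt_spec a i hi, buildPrv_spec a i hi, buildPre_eq]
    have h1 : ((List.range (a.length + 1)).map (S a)).getD (specN a i) 0 = S a (specN a i) :=
      getD_map_range (S a) (a.length + 1) (specN a i) 0 (by have := specN_le a i hi; omega)
    have hsp := specP_ge a i
    have hsp2 := specP_lt a i
    have h2 : PySem.List.pyGetD ((List.range (a.length + 1)).map (S a)) (specP a i + 1) 0
        = S a (specP a i + 1).toNat := by
      rw [PySem.List.pyGetD_eq_getElem _ _ (by omega) (by simp; omega)]
      rw [List.getElem_map, List.getElem_range]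
    rw [h1, h2, cand]
  rw [hcands, hm, List.range_succ_eq_map, List.map_cons, PySem.List.max?_id_cons, List.map_map]
  rfl


theorem enumerate_eq (a : List Int) :
    PySem.List.enumerate a = (List.range a.length).map (fun (k : Nat) => ((k : Int), a.getD k 0)) := by
  rw [PySem.List.enumerate_eq_map_pyRange (d := 0), PySem.List.len_eq,
    PySem.List.pyRange_zero_natCast, List.map_map]
  apply List.map_congr_left
  intro k hk
  simp

def sIdx (a : List Int) : Nat → List Nat
  | 0 => [0]
  | j + 1 => (j + 1) :: (sIdx a j).dropWhile (fun i => decide (a.getD (j + 1) 0 < a.getD i 0))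

theorem sIdx_le (a : List Int) (j : Nat) : ∀ i ∈ sIdx a j, i ≤ j := by
  induction j with
  | zero => simp [sIdx]
  | succ j ih =>
    intro i hi
    rcases List.mem_cons.mp hi with rfl | hi
    · exact le_rfl
    · exact le_trans (ih i (List.Sublist.mem hi (List.dropWhile_sublist _))) (by omega)

theorem sIdx_pairwise (a : List Int) (j : Nat) : (sIdx a j).Pairwise (fun x y => y < x) := by
  induction j with
  | zero => simp [sIdx]
  | succ j ih =>
    rw [sIdx, List.pairwise_cons]
    refine ⟨?_, List.Pairwise.sublist (List.dropWhile_sublist _) ih⟩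
    intro y hy
    have := sIdx_le a j y (List.Sublist.mem hy (List.dropWhile_sublist _))
    omega

theorem sIdx_mem (a : List Int) :
    ∀ j i, i ∈ sIdx a j ↔ (i ≤ j ∧ ∀ k, i < k → k ≤ j → a.getD i 0 ≤ a.getD k 0) := by
  intro j
  induction j with
  | zero =>
    intro i
    simp only [sIdx, List.mem_singleton]
    constructor
    · rintro rfl
      exact ⟨le_rfl, fun k h1 h2 => by omega⟩
    · rintro ⟨h1, _⟩
      omega
  | succ j ih =>
    intro i
    have hpw : (sIdx a j).Pairwise
        (fun x y => decide (a.getD (j + 1) 0 < a.getD y 0) = true →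
          decide (a.getD (j + 1) 0 < a.getD x 0) = true) := by
      refine List.Pairwise.imp_of_mem ?_ (sIdx_pairwise a j)
      intro x y hx hy hlt hq
      obtain ⟨hyj, hyall⟩ := (ih y).mp hy
      have hxj := sIdx_le a j x hx
      have : a.getD y 0 ≤ a.getD x 0 := hyall x hlt hxj
      simp only [decide_eq_true_eq] at hq ⊢
      omega
    rw [sIdx, List.mem_cons, mem_dropWhile_iff_pw _ _ hpw, ih i]
    constructor
    · rintro (rfl | ⟨⟨h1, h2⟩, hq⟩)
      · exact ⟨le_rfl, fun k hk1 hk2 => by omega⟩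
      · refine ⟨by omega, fun k hk1 hk2 => ?_⟩
        rcases Nat.lt_succ_iff_lt_or_eq.mp (Nat.lt_succ_of_le hk2) with h | rfl
        · exact h2 k hk1 (by omega)
        · simp only [decide_eq_false_iff_not, not_lt] at hq
          exact hq
    · rintro ⟨h1, h2⟩
      by_cases hij : i = j + 1
      · exact Or.inl hij
      · refine Or.inr ⟨⟨by omega, fun k hk1 hk2 => h2 k hk1 (by omega)⟩, ?_⟩
        simp only [decide_eq_false_iff_not, not_lt]
        exact h2 (j + 1) (by omega) le_rfl

theorem popSmaller_spec (v c : Int) :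
    ∀ (P K : List (Int × Int)) (tbl : List (Option Int)),
      (∀ p ∈ P, v < p.2) → (∀ q ∈ K.head?, ¬ v < q.2) →
      popSmaller v c tbl (P ++ K) =
        (P.foldl (fun t p => PySem.List.pySetD t p.1 (some c)) tbl, K) := by
  intro P
  induction P with
  | nil =>
    intro K tbl _ hK
    rcases K with _ | ⟨⟨i, x⟩, K'⟩
    · rfl
    · rw [List.nil_append, popSmaller, if_neg, List.foldl_nil]
      exact hK (i, x) (by simp)
  | cons p P' ih =>
    intro K tbl hP hK
    obtain ⟨i, x⟩ := p
    rw [List.cons_append, popSmaller, if_pos (hP (i, x) (by simp)), List.foldl_cons]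
    exact ih K _ (fun p hp => hP p (List.mem_cons_of_mem _ hp)) hK


def fwdA (a : List Int) (j : Nat) : List Int × List (Option Int) × List (Int × Int) :=
  ((List.range j).map (fun (k : Nat) => ((k : Int), a.getD k 0))).foldl fwdStep
    ([], List.replicate a.length none, [(0, PySem.List.pyGetD a 0 0)])

theorem fwd_inv (a : List Int) (ha : a ≠ []) :
    ∀ j, 1 ≤ j → j ≤ a.length →
      (fwdA a j).1 = (List.range j).map (fun k => S a (k + 1)) ∧
      (fwdA a j).2.1.length = a.length ∧
      (∀ i, i < a.length → (fwdA a j).2.1.getD i none =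
        (if specN a i ≤ j - 1 then some ((specN a i : Nat) : Int) else none)) ∧
      (fwdA a j).2.2 = (sIdx a (j - 1)).map (fun (i : Nat) => ((i : Int), a.getD i 0)) := by
  have hn : 0 < a.length := List.length_pos_iff.mpr ha
  intro j
  induction j with
  | zero => omega
  | succ j ih =>
    intro _ hj2
    rcases Nat.eq_or_lt_of_le (Nat.one_le_iff_ne_zero.mpr (Nat.succ_ne_zero j)) with hj1 | hj1
    · -- base case j + 1 = 1
      have hj0 : j = 0 := by omega
      subst hj0
      have hbase : fwdA a 1 = ([a.getD 0 0], List.replicate a.length none,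
          [((0 : Int), a.getD 0 0)]) := by
        rw [fwdA]
        simp only [List.range_one, List.map_cons, List.map_nil, List.foldl_cons, List.foldl_nil]
        rw [fwdStep, if_pos (by norm_num), PySem.List.pyGetD_zero]
        simp
      rw [hbase]
      refine ⟨?_, by simp, ?_, ?_⟩
      · have : S a 1 = a.getD 0 0 := by
          have := S_succ a 0 hn
          simpa [S] using this
        simp [this]
      · intro i hi
        rw [if_neg (by have := specN_gt a i; omega)]
        rw [List.getD, List.getElem?_replicate, if_pos hi]
        rfl
      · simp [sIdx]
    · -- inductive step: 1 ≤ j, j + 1 ≤ a.length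
      obtain ⟨t, rfl⟩ : ∃ t, j = t + 1 := ⟨j - 1, by omega⟩
      obtain ⟨ihpre, ihlen, ihtbl, ihstk⟩ := ih (by omega) (by omega)
      have hjn : t + 1 < a.length := by omega
      have hstep : fwdA a (t + 2) = fwdStep (fwdA a (t + 1)) (((t + 1 : Nat) : Int), a.getD (t + 1) 0) := by
        rw [fwdA, fwdA, List.range_succ, List.map_append, List.foldl_append]
        simp
      set v := a.getD (t + 1) 0 with hv
      set q : Nat → Bool := fun i => decide (v < a.getD i 0) with hqdef
      set L := sIdx a t with hL
      set f : Nat → Int × Int := fun i => ((i : Int), a.getD i 0) with hf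
      have hLle : ∀ i ∈ L, i ≤ t := sIdx_le a t
      have hpw : L.Pairwise (fun x y => q y = true → q x = true) := by
        refine List.Pairwise.imp_of_mem ?_ (sIdx_pairwise a t)
        intro x y hx hy hlt hq
        obtain ⟨hyj, hyall⟩ := (sIdx_mem a t y).mp hy
        have hxj := hLle x hx
        have : a.getD y 0 ≤ a.getD x 0 := hyall x hlt hxj
        simp only [hqdef, decide_eq_true_eq] at hq ⊢
        omega
      have hstk2 : (fwdA a (t + 1)).2.2 = (L.takeWhile q).map f ++ (L.dropWhile q).map f := by
        rw [ihstk, ← List.map_append, List.takeWhile_append_dropWhile]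
        rfl
      have hfold : ∀ (L' : List Nat) (t0 : List (Option Int)),
          (L'.map f).foldl (fun tb p => PySem.List.pySetD tb p.1 (some ((t + 1 : Nat) : Int))) t0
            = L'.foldl (fun tb i => tb.set i (some ((t + 1 : Nat) : Int))) t0 := by
        intro L'
        induction L' with
        | nil => intro t0; rfl
        | cons x xs ihx =>
          intro t0
          simp only [List.map_cons, List.foldl_cons, hf, PySem.List.pySetD_natCast]
          exact ihx _
      have hpop : popSmaller v ((t + 1 : Nat) : Int) (fwdA a (t + 1)).2.1 ((fwdA a (t + 1)).2.2) =
          ((L.takeWhile q).foldl (fun tb i => tb.set i (some ((t + 1 : Nat) : Int))) (fwdA a (t + 1)).2.1,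
            (L.dropWhile q).map f) := by
        rw [hstk2, popSmaller_spec v _ _ _ _ ?_ ?_, hfold]
        · intro p hp
          obtain ⟨i, hi, rfl⟩ := List.mem_map.mp hp
          have := List.mem_takeWhile_imp hi
          simpa [hqdef, hf] using this
        · intro p hp
          rw [List.head?_map] at hp
          rcases hh : (L.dropWhile q).head? with _ | i
          · rw [hh] at hp; cases hp
          · rw [hh] at hp
            have hpi : p = f i := by simpa using hp.symm
            subst hpi
            have hmem : i ∈ L.dropWhile q := List.mem_of_mem_head? hh
            have := ((mem_dropWhile_iff_pw q L hpw i).mp hmem).2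
            simp only [hqdef, decide_eq_false_iff_not] at this
            simpa [hf] using this
      have hneq : ¬ ((t + 1 : Nat) : Int) = 0 := by push_cast; omega
      have hexp : fwdA a (t + 2) =
          ((fwdA a (t + 1)).1 ++ [PySem.List.pyGetD (fwdA a (t + 1)).1 (-1) 0 + v],
            (L.takeWhile q).foldl (fun tb i => tb.set i (some ((t + 1 : Nat) : Int))) (fwdA a (t + 1)).2.1,
            (((t + 1 : Nat) : Int), v) :: (L.dropWhile q).map f) := by
        rw [hstep]
        show fwdStep ((fwdA a (t + 1)).1, (fwdA a (t + 1)).2.1, (fwdA a (t + 1)).2.2) _ = _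
        rw [fwdStep]
        simp only [hneq, if_false, hpop]
      rw [hexp]
      refine ⟨?_, ?_, ?_, ?_⟩
      · -- prefix sums
        rw [ihpre]
        have hlast : PySem.List.pyGetD ((List.range (t + 1)).map (fun k => S a (k + 1))) (-1) 0
            = S a (t + 1) := by
          rw [List.range_succ, List.map_append, List.map_cons, List.map_nil,
            PySem.List.pyGetD_neg_one_append_singleton]
        rw [hlast, List.range_succ (n := t + 1), List.map_append]
        simp only [List.map_cons, List.map_nil]
        rw [← S_succ a (t + 1) hjn]
      · rw [length_foldl_set, ihlen]
      · -- next-smaller table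
        intro i hi
        rw [getD_foldl_set _ _ _ _ _ (fun k hk => by
          rw [ihlen]; exact lt_of_le_of_lt (hLle k (List.IsPrefix.mem hk (List.takeWhile_prefix q))) (by omega))]
        have hmemT : i ∈ L.takeWhile q ↔ i ∈ L ∧ q i = true := mem_takeWhile_iff_pw q L hpw i
        by_cases hiT : i ∈ L.takeWhile q
        · obtain ⟨hiL, hq⟩ := hmemT.mp hiT
          obtain ⟨hile, hall⟩ := (sIdx_mem a t i).mp hiL
          simp only [hqdef, decide_eq_true_eq] at hq
          have hspec : specN a i = t + 1 := by
            apply specN_eq a i (t + 1) (by omega) (by omega)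
              (fun k hk1 hk2 => hall k hk1 (by omega))
            exact Or.inr hq
          rw [if_pos hiT, hspec, if_pos (by omega)]
        · rw [if_neg hiT, ihtbl i hi]
          by_cases hle : specN a i ≤ t
          · rw [if_pos (by omega), if_pos (by omega)]
          · have hne : specN a i ≠ t + 1 := by
              intro hc
              apply hiT
              apply hmemT.mpr
              have hil : i < t + 1 := by have := specN_gt a i; omega
              refine ⟨(sIdx_mem a t i).mpr ⟨by omega, fun k hk1 hk2 => specN_between a i k hk1 (by omega)⟩, ?_⟩
              have := specN_at a i (by omega)
              rw [hc] at this
              simp only [hqdef, decide_eq_true_eq]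
              exact this
            rw [if_neg (by omega), if_neg (by omega)]
      · -- stack
        show _ = (sIdx a (t + 1)).map f
        rw [sIdx]
        rfl


theorem pySetD_neg_one {α : Type} (xs : List α) (h : xs ≠ []) (v : α) :
    PySem.List.pySetD xs (-1) v = xs.set (xs.length - 1) v := by
  have hl : 1 ≤ xs.length := List.length_pos_iff.mpr h
  simp [PySem.List.pySetD, PySem.List.pySet?, PySem.List.pyIdx?, hl]

theorem enumerate_rev_eq (a : List Int) :
    PySem.List.enumerate a.reverse =
      (List.range a.length).map (fun (k : Nat) => ((k : Int), a.getD (a.length - 1 - k) 0)) := by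
  rw [enumerate_eq, List.length_reverse]
  apply List.map_congr_left
  intro k hk
  rw [List.mem_range] at hk
  simp only [List.getD, List.getElem?_reverse hk]

def sIdxB (a : List Int) : Nat → List Nat
  | 0 => [a.length - 1]
  | r + 1 => (a.length - 2 - r) ::
      (sIdxB a r).dropWhile (fun i => decide (a.getD (a.length - 2 - r) 0 < a.getD i 0))

theorem sIdxB_bounds (a : List Int) (r : Nat) :
    ∀ i ∈ sIdxB a r, a.length - 1 - r ≤ i ∧ i ≤ a.length - 1 := by
  induction r with
  | zero =>
    intro i hi
    simp only [sIdxB, List.mem_singleton] at hi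
    omega
  | succ r ih =>
    intro i hi
    rcases List.mem_cons.mp hi with rfl | hi
    · omega
    · have := ih i (List.Sublist.mem hi (List.dropWhile_sublist _))
      omega

theorem sIdxB_pairwise (a : List Int) (r : Nat) (hr : r ≤ a.length - 1) :
    (sIdxB a r).Pairwise (fun x y => x < y) := by
  induction r with
  | zero => simp [sIdxB]
  | succ r ih =>
    rw [sIdxB, List.pairwise_cons]
    refine ⟨?_, List.Pairwise.sublist (List.dropWhile_sublist _) (ih (by omega))⟩
    intro y hy
    have := (sIdxB_bounds a r y (List.Sublist.mem hy (List.dropWhile_sublist _))).1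
    omega

theorem sIdxB_mem (a : List Int) :
    ∀ r, r ≤ a.length - 1 → ∀ i, (i ∈ sIdxB a r ↔
      (a.length - 1 - r ≤ i ∧ i ≤ a.length - 1 ∧
        ∀ k, a.length - 1 - r ≤ k → k < i → a.getD i 0 ≤ a.getD k 0)) := by
  intro r
  induction r with
  | zero =>
    intro _ i
    simp only [sIdxB, List.mem_singleton]
    constructor
    · rintro rfl
      exact ⟨le_rfl, le_rfl, fun k h1 h2 => by omega⟩
    · rintro ⟨h1, h2, _⟩
      omega
  | succ r ih =>
    intro hr i
    have hr' : r ≤ a.length - 1 := by omega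
    have hpw : (sIdxB a r).Pairwise
        (fun x y => decide (a.getD (a.length - 2 - r) 0 < a.getD y 0) = true →
          decide (a.getD (a.length - 2 - r) 0 < a.getD x 0) = true) := by
      refine List.Pairwise.imp_of_mem ?_ (sIdxB_pairwise a r hr')
      intro x y hx hy hlt hq
      obtain ⟨hy1, hy2, hyall⟩ := (ih hr' y).mp hy
      have hx1 := (sIdxB_bounds a r x hx).1
      have : a.getD y 0 ≤ a.getD x 0 := hyall x hx1 hlt
      simp only [decide_eq_true_eq] at hq ⊢
      omega
    rw [sIdxB, List.mem_cons, mem_dropWhile_iff_pw _ _ hpw, ih hr' i]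
    constructor
    · rintro (rfl | ⟨⟨h1, h2, h3⟩, hq⟩)
      · exact ⟨by omega, by omega, fun k hk1 hk2 => by omega⟩
      · refine ⟨by omega, h2, fun k hk1 hk2 => ?_⟩
        by_cases hkc : k = a.length - 2 - r
        · subst hkc
          simp only [decide_eq_false_iff_not, not_lt] at hq
          exact hq
        · exact h3 k (by omega) hk2
    · rintro ⟨h1, h2, h3⟩
      by_cases hic : i = a.length - 2 - r
      · exact Or.inl hic
      · refine Or.inr ⟨⟨by omega, h2, fun k hk1 hk2 => h3 k (by omega) hk2⟩, ?_⟩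
        simp only [decide_eq_false_iff_not, not_lt]
        exact h3 (a.length - 2 - r) (by omega) (by omega)

def bwdA (a : List Int) (r : Nat) : List (Option Int) × List (Int × Int) :=
  ((List.range r).map (fun (k : Nat) => ((k : Int), a.getD (a.length - 1 - k) 0))).foldl
    (bwdStep (PySem.List.len a))
    (List.replicate a.length none, [(-1, PySem.List.pyGetD a (-1) 0)])

theorem bwd_inv (a : List Int) (ha : a ≠ []) :
    ∀ r, 1 ≤ r → r ≤ a.length →
      (bwdA a r).1.length = a.length ∧
      (∀ i, i < a.length → (bwdA a r).1.getD i none =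
        (if ((a.length - r : Nat) : Int) ≤ specP a i then some (specP a i) else none)) ∧
      (bwdA a r).2 = (sIdxB a (r - 1)).map
        (fun (i : Nat) => (if i = a.length - 1 then (-1 : Int) else (i : Int), a.getD i 0)) := by
  have hn : 0 < a.length := List.length_pos_iff.mpr ha
  intro r
  induction r with
  | zero => omega
  | succ r ih =>
    intro _ hr2
    rcases Nat.eq_or_lt_of_le (Nat.one_le_iff_ne_zero.mpr (Nat.succ_ne_zero r)) with hr1 | hr1
    · -- base case r + 1 = 1 : the first backward iteration is skipped
      have hr0 : r = 0 := by omega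
      subst hr0
      have hbase : bwdA a 1 = (List.replicate a.length none,
          [(-1, PySem.List.pyGetD a (-1) 0)]) := by
        rw [bwdA]
        simp only [List.range_one, List.map_cons, List.map_nil, List.foldl_cons, List.foldl_nil]
        rw [bwdStep, if_neg (by norm_num)]
      rw [hbase]
      refine ⟨by simp, ?_, ?_⟩
      · intro i hi
        rw [if_neg (by have := specP_lt a i; push_cast; omega)]
        rw [List.getD, List.getElem?_replicate, if_pos hi]
        rfl
      · simp only [sIdxB, List.map_cons, List.map_nil]
        rw [PySem.List.pyGetD_neg_one a 0 ha, List.getLast_eq_getElem,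
          List.getD_eq_getElem a 0 (by omega)]
        simp
    · -- inductive step
      obtain ⟨s, rfl⟩ : ∃ s, r = s + 1 := ⟨r - 1, by omega⟩
      obtain ⟨ihlen, ihtbl, ihstk⟩ := ih (by omega) (by omega)
      have hsn : s + 2 ≤ a.length := hr2
      set c : Nat := a.length - 2 - s with hcdef
      have hc_lt : c < a.length := by omega
      have hstep : bwdA a (s + 2) = bwdStep (PySem.List.len a) (bwdA a (s + 1))
          (((s + 1 : Nat) : Int), a.getD c 0) := by
        rw [bwdA, bwdA, List.range_succ, List.map_append, List.foldl_append]
        simp only [List.map_cons, List.map_nil, List.foldl_cons, List.foldl_nil]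
        rw [show a.length - 1 - (s + 1) = c from by omega]
      set v := a.getD c 0 with hv
      set q : Nat → Bool := fun i => decide (v < a.getD i 0) with hqdef
      set L := sIdxB a s with hL
      set fB : Nat → Int × Int :=
        fun i => (if i = a.length - 1 then (-1 : Int) else (i : Int), a.getD i 0) with hfB
      have hLb : ∀ i ∈ L, a.length - 1 - s ≤ i ∧ i ≤ a.length - 1 := sIdxB_bounds a s
      have hpw : L.Pairwise (fun x y => q y = true → q x = true) := by
        refine List.Pairwise.imp_of_mem ?_ (sIdxB_pairwise a s (by omega))
        intro x y hx hy hlt hq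
        obtain ⟨hy1, hy2, hyall⟩ := (sIdxB_mem a s (by omega) y).mp hy
        have hx1 := (hLb x hx).1
        have : a.getD y 0 ≤ a.getD x 0 := hyall x hx1 hlt
        simp only [hqdef, decide_eq_true_eq] at hq ⊢
        omega
      have hcint : PySem.List.len a - 1 - ((s + 1 : Nat) : Int) = ((c : Nat) : Int) := by
        rw [PySem.List.len_eq]
        push_cast
        omega
      have hstk2 : (bwdA a (s + 1)).2 = (L.takeWhile q).map fB ++ (L.dropWhile q).map fB := by
        rw [ihstk, ← List.map_append, List.takeWhile_append_dropWhile]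
        rfl
      have hfold : ∀ (L' : List Nat) (t0 : List (Option Int)), t0.length = a.length →
          (∀ i ∈ L', i ≤ a.length - 1) →
          (L'.map fB).foldl (fun tb p => PySem.List.pySetD tb p.1 (some ((c : Nat) : Int))) t0
            = L'.foldl (fun tb i => tb.set i (some ((c : Nat) : Int))) t0 := by
        intro L'
        induction L' with
        | nil => intro t0 _ _; rfl
        | cons x xs ihx =>
          intro t0 hlen hb
          simp only [List.map_cons, List.foldl_cons]
          have hx : PySem.List.pySetD t0 (fB x).1 (some ((c : Nat) : Int))
              = t0.set x (some ((c : Nat) : Int)) := by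
            have hfx : (fB x).1 = if x = a.length - 1 then (-1 : Int) else (x : Int) := by
              rw [hfB]
            rw [hfx]
            by_cases hxl : x = a.length - 1
            · rw [if_pos hxl,
                pySetD_neg_one t0 (by intro hc0; rw [hc0] at hlen; simp at hlen; omega) _,
                hlen, ← hxl]
            · rw [if_neg hxl, PySem.List.pySetD_natCast]
          rw [hx]
          exact ihx _ (by simp [hlen]) (fun i hi => hb i (List.mem_cons_of_mem _ hi))
      have hpop : popSmaller v ((c : Nat) : Int) (bwdA a (s + 1)).1 ((bwdA a (s + 1)).2) =
          ((L.takeWhile q).foldl (fun tb i => tb.set i (some ((c : Nat) : Int))) (bwdA a (s + 1)).1,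
            (L.dropWhile q).map fB) := by
        rw [hstk2, popSmaller_spec v _ _ _ _ ?_ ?_]
        · rw [hfold _ _ ihlen
            (fun i hi => (hLb i (List.IsPrefix.mem hi (List.takeWhile_prefix q))).2)]
        · intro p hp
          obtain ⟨i, hi, rfl⟩ := List.mem_map.mp hp
          have := List.mem_takeWhile_imp hi
          simpa [hqdef, hfB] using this
        · intro p hp
          rw [List.head?_map] at hp
          rcases hh : (L.dropWhile q).head? with _ | i
          · rw [hh] at hp; cases hp
          · rw [hh] at hp
            have hpi : p = fB i := by simpa using hp.symm
            subst hpi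
            have hmem : i ∈ L.dropWhile q := List.mem_of_mem_head? hh
            have := ((mem_dropWhile_iff_pw q L hpw i).mp hmem).2
            simp only [hqdef, decide_eq_false_iff_not] at this
            simpa [hfB] using this
      have hexp : bwdA a (s + 2) =
          ((L.takeWhile q).foldl (fun tb i => tb.set i (some ((c : Nat) : Int))) (bwdA a (s + 1)).1,
            (((c : Nat) : Int), v) :: (L.dropWhile q).map fB) := by
        rw [hstep]
        show bwdStep (PySem.List.len a) ((bwdA a (s + 1)).1, (bwdA a (s + 1)).2) _ = _
        rw [bwdStep]
        simp only [hcint, hpop]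
        rw [if_pos (by push_cast; omega)]
      rw [hexp]
      refine ⟨?_, ?_, ?_⟩
      · rw [length_foldl_set, ihlen]
      · -- last-smaller table
        intro i hi
        rw [getD_foldl_set _ _ _ _ _ (fun k hk => by
          rw [ihlen]
          have := (hLb k (List.IsPrefix.mem hk (List.takeWhile_prefix q))).2
          omega)]
        have hmemT : i ∈ L.takeWhile q ↔ i ∈ L ∧ q i = true := mem_takeWhile_iff_pw q L hpw i
        by_cases hiT : i ∈ L.takeWhile q
        · obtain ⟨hiL, hq⟩ := hmemT.mp hiT
          obtain ⟨hi1, hi2, hall⟩ := (sIdxB_mem a s (by omega) i).mp hiL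
          simp only [hqdef, decide_eq_true_eq] at hq
          have hspec : specP a i = ((c : Nat) : Int) := by
            apply specP_eq a i _ (by omega) (by omega)
              (fun k hk1 hk2 => ?_) (Or.inr ⟨by omega, by simpa using hq⟩)
            have hkc : c < k := by exact_mod_cast hk2
            exact hall k (by omega) hk1
          rw [if_pos hiT, hspec, if_pos (Nat.cast_le.mpr (by omega))]
        · rw [if_neg hiT, ihtbl i hi]
          by_cases hle : ((a.length - (s + 1) : Nat) : Int) ≤ specP a i
          · rw [if_pos hle, if_pos (by omega)]
          · have hne : specP a i ≠ ((c : Nat) : Int) := by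
              intro hcontra
              apply hiT
              apply hmemT.mpr
              have h0 : 0 ≤ specP a i := by rw [hcontra]; positivity
              obtain ⟨hat, hlt2⟩ := specP_at a i h0
              have hct : (specP a i).toNat = c := by omega
              rw [hct] at hat hlt2
              constructor
              · apply (sIdxB_mem a s (by omega) i).mpr
                refine ⟨by omega, by omega, fun k hk1 hk2 => ?_⟩
                exact specP_between a i k hk2 (by rw [hcontra]; omega)
              · simp only [hqdef, decide_eq_true_eq]
                exact hat
            rw [if_neg hle, if_neg (by
              have := specP_ge a i
              omega)]
      · -- stack
        show _ = (sIdxB a (s + 1)).map fB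
        rw [sIdxB]
        have hcfB : fB c = (((c : Nat) : Int), v) := by
          rw [hfB]
          simp only [hv]
          rw [if_neg (by omega)]
        rw [List.map_cons, ← hcdef, hcfB]


theorem pre_at (a : List Int) (m : Nat) (hm : m < a.length) :
    PySem.List.pyGetD ((List.range a.length).map (fun k => S a (k + 1))) ((m : Nat) : Int) 0
      = S a (m + 1) := by
  rw [PySem.List.pyGetD_natCast, getD_map_range _ _ _ _ hm]

theorem pre_neg (a : List Int) (ha : a ≠ []) :
    PySem.List.pyGetD ((List.range a.length).map (fun k => S a (k + 1))) (-1) 0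
      = S a a.length := by
  have hn : 0 < a.length := List.length_pos_iff.mpr ha
  obtain ⟨t, ht⟩ : ∃ t, a.length = t + 1 := ⟨a.length - 1, by omega⟩
  rw [ht, List.range_succ, List.map_append, List.map_cons, List.map_nil,
    PySem.List.pyGetD_neg_one_append_singleton]

theorem optstep_congr (acc : Option Int) (x y : Int) (h : x = y) :
    (match acc with | none => some x | some m => if x > m then some x else some m)
      = (match acc with | none => some y | some m => if y > m then some y else some m) := by
  rw [h]

theorem finalStep_eval (a : List Int) (ha : a ≠ []) (nT lT : List (Option Int))
    (hnT : ∀ i, i < a.length → nT.getD i none =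
      (if specN a i ≤ a.length - 1 then some ((specN a i : Nat) : Int) else none))
    (hlT : ∀ i, i < a.length → lT.getD i none =
      (if (0 : Int) ≤ specP a i then some (specP a i) else none))
    (i : Nat) (hi : i < a.length) (acc : Option Int) :
    finalStep ((List.range a.length).map (fun k => S a (k + 1))) nT lT acc ((i : Int), a.getD i 0)
      = match acc with
        | none => some (cand a i)
        | some m => if cand a i > m then some (cand a i) else some m := by
  have hn : 0 < a.length := List.length_pos_iff.mpr ha
  have hNle := specN_le a i hi
  have hNgt := specN_gt a i
  have hPlt := specP_lt a i
  have hPge := specP_ge a i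
  have hS0 : S a 0 = 0 := rfl
  have hgetn : PySem.List.pyGetD nT ((i : Nat) : Int) none = nT.getD i none := by
    rw [PySem.List.pyGetD_natCast]
  have hgetl : PySem.List.pyGetD lT ((i : Nat) : Int) none = lT.getD i none := by
    rw [PySem.List.pyGetD_natCast]
  have hSpre : ∀ nsi : Int, nsi = ((specN a i : Nat) : Int) →
      PySem.List.pyGetD ((List.range a.length).map (fun k => S a (k + 1))) (nsi - 1) 0
        = S a (specN a i) := by
    intro nsi hnsi
    rw [hnsi, show ((specN a i : Nat) : Int) - 1 = (((specN a i - 1 : Nat)) : Int) from by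
      omega]
    rw [pre_at a _ (by omega), show specN a i - 1 + 1 = specN a i from by omega]
  by_cases hN : specN a i ≤ a.length - 1
  · by_cases hP : (0 : Int) ≤ specP a i
    · have hi1 : 1 ≤ i := by
        rcases Nat.eq_zero_or_pos i with rfl | h
        · simp [specP, specPgo] at hP
        · exact h
      simp only [finalStep, hgetn, hgetl, hnT i hi, hlT i hi, if_pos hN, if_pos hP]
      simp only [reduceCtorEq, and_false, if_false]
      apply optstep_congr
      rw [hSpre _ rfl, pre_at a i hi,
        show ((i : Nat) : Int) - 1 = (((i - 1 : Nat)) : Int) from by omega,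
        pre_at a _ (by omega),
        show specP a i = (((specP a i).toNat : Nat) : Int) from by omega,
        pre_at a _ (by omega),
        show i - 1 + 1 = i from by omega]
      rw [cand, show (specP a i + 1).toNat = (specP a i).toNat + 1 from by omega]
      rw [S_succ a i hi]
      ring
    · have hPm1 : specP a i = -1 := by omega
      have h0T : (0 : Int) ≤ specP a i + 1 := by omega
      simp only [finalStep, hgetn, hgetl, hnT i hi, hlT i hi, if_pos hN, if_neg hP]
      rcases Nat.eq_zero_or_pos i with rfl | hi1
      · simp only [Nat.cast_zero, gt_iff_lt, lt_self_iff_false, false_and, if_false]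
        apply optstep_congr
        rw [hSpre _ rfl, PySem.List.pyGetD_zero, getD_map_range _ _ _ _ hi, cand, hPm1]
        simp only [show ((-1 : Int) + 1).toNat = 0 from rfl, hS0]
        rw [show (0 : Nat) + 1 = 1 from rfl, S_succ a 0 hn, hS0]
        ring
      · simp only [gt_iff_lt, and_true]
        rw [if_pos (by exact_mod_cast hi1)]
        apply optstep_congr
        rw [hSpre _ rfl, pre_at a i hi,
          show ((i : Nat) : Int) - 1 = (((i - 1 : Nat)) : Int) from by omega,
          pre_at a _ (by omega), show i - 1 + 1 = i from by omega]
        rw [cand, hPm1]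
        simp only [show ((-1 : Int) + 1).toNat = 0 from rfl, hS0]
        rw [S_succ a i hi]
        ring
  · have hNn : specN a i = a.length := by omega
    by_cases hP : (0 : Int) ≤ specP a i
    · have hi1 : 1 ≤ i := by
        rcases Nat.eq_zero_or_pos i with rfl | h
        · simp [specP, specPgo] at hP
        · exact h
      simp only [finalStep, hgetn, hgetl, hnT i hi, hlT i hi, if_neg hN, if_pos hP]
      simp only [reduceCtorEq, and_false, if_false]
      apply optstep_congr
      rw [pre_neg a ha, pre_at a i hi,
        show ((i : Nat) : Int) - 1 = (((i - 1 : Nat)) : Int) from by omega,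
        pre_at a _ (by omega),
        show specP a i = (((specP a i).toNat : Nat) : Int) from by omega,
        pre_at a _ (by omega),
        show i - 1 + 1 = i from by omega]
      rw [cand, hNn, show (specP a i + 1).toNat = (specP a i).toNat + 1 from by omega]
      rw [S_succ a i hi]
      ring
    · have hPm1 : specP a i = -1 := by omega
      simp only [finalStep, hgetn, hgetl, hnT i hi, hlT i hi, if_neg hN, if_neg hP]
      rcases Nat.eq_zero_or_pos i with rfl | hi1
      · simp only [Nat.cast_zero, gt_iff_lt, lt_self_iff_false, false_and, if_false]
        apply optstep_congr
        rw [pre_neg a ha, PySem.List.pyGetD_zero, getD_map_range _ _ _ _ hi, cand, hNn, hPm1]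
        simp only [show ((-1 : Int) + 1).toNat = 0 from rfl, hS0]
        rw [show (0 : Nat) + 1 = 1 from rfl, S_succ a 0 hn, hS0]
        ring
      · simp only [gt_iff_lt, and_true]
        rw [if_pos (by exact_mod_cast hi1)]
        apply optstep_congr
        rw [pre_neg a ha, pre_at a i hi,
          show ((i : Nat) : Int) - 1 = (((i - 1 : Nat)) : Int) from by omega,
          pre_at a _ (by omega), show i - 1 + 1 = i from by omega]
        rw [cand, hNn, hPm1]
        simp only [show ((-1 : Int) + 1).toNat = 0 from rfl, hS0]
        rw [S_succ a i hi]
        ring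

theorem foldFinal (a : List Int) (ha : a ≠ []) (nT lT : List (Option Int))
    (hnT : ∀ i, i < a.length → nT.getD i none =
      (if specN a i ≤ a.length - 1 then some ((specN a i : Nat) : Int) else none))
    (hlT : ∀ i, i < a.length → lT.getD i none =
      (if (0 : Int) ≤ specP a i then some (specP a i) else none)) :
    ∀ (l : List Nat), (∀ k ∈ l, k < a.length) → ∀ (m : Int),
      l.foldl (fun acc (k : Nat) =>
          finalStep ((List.range a.length).map (fun k2 => S a (k2 + 1))) nT lT acc
            ((k : Int), a.getD k 0)) (some m)
        = some (l.foldl (fun m' k => max m' (cand a k)) m) := by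
  intro l
  induction l with
  | nil => intro _ m; rfl
  | cons k t ih =>
    intro hb m
    rw [List.foldl_cons, List.foldl_cons,
      finalStep_eval a ha nT lT hnT hlT k (hb k List.mem_cons_self) (some m)]
    have hmax : (if cand a k > m then some (cand a k) else some m) = some (max m (cand a k)) := by
      rcases le_or_gt (cand a k) m with h | h
      · rw [if_neg (by omega), max_eq_left h]
      · rw [if_pos h, max_eq_right (le_of_lt h)]
    simp only []
    rw [hmax]
    exact ih (fun x hx => hb x (List.mem_cons_of_mem _ hx)) (max m (cand a k))


theorem a_eq (a : List Int) (t : Nat) (hm : a.length = t + 1) :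
    find_max_min_product a =
      PySem.Int.mod (((List.range t).map (fun k => cand a (k + 1))).foldl max (cand a 0))
        1000000007 := by
  have ha : a ≠ [] := by intro h; rw [h] at hm; simp at hm
  have hn : 0 < a.length := by omega
  obtain ⟨fpre, flen, ftbl, _⟩ := fwd_inv a ha a.length (by omega) le_rfl
  obtain ⟨blen, btbl, _⟩ := bwd_inv a ha a.length (by omega) le_rfl
  have hlT : ∀ i, i < a.length → (bwdA a a.length).1.getD i none =
      (if (0 : Int) ≤ specP a i then some (specP a i) else none) := by
    intro i hi
    rw [btbl i hi, Nat.sub_self, Nat.cast_zero]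
  simp only [find_max_min_product]
  rw [PySem.List.len_eq, Int.toNat_natCast, PySem.List.slice?_none_none_neg_one,
    Option.getD_some]
  rw [show PySem.List.enumerate a.reverse =
      (List.range a.length).map (fun (k : Nat) => ((k : Int), a.getD (a.length - 1 - k) 0))
    from enumerate_rev_eq a]
  rw [show PySem.List.enumerate a =
      (List.range a.length).map (fun (k : Nat) => ((k : Int), a.getD k 0))
    from enumerate_eq a]
  rw [show ((List.range a.length).map (fun (k : Nat) => ((k : Int), a.getD k 0))).foldl fwdStep
      (([] : List Int), List.replicate a.length none, [((0 : Int), PySem.List.pyGetD a 0 0)])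
      = fwdA a a.length from rfl]
  rw [show ((List.range a.length).map
        (fun (k : Nat) => ((k : Int), a.getD (a.length - 1 - k) 0))).foldl
        (bwdStep ((a.length : Nat) : Int))
        (List.replicate a.length none, [((-1 : Int), PySem.List.pyGetD a (-1) 0)])
      = bwdA a a.length from by rw [bwdA, PySem.List.len_eq]]
  rw [fpre, List.foldl_map]
  set pre0 := (List.range a.length).map (fun k => S a (k + 1)) with hpre0
  have hsplit : List.range a.length = 0 :: (List.range t).map Nat.succ := by
    rw [hm, List.range_succ_eq_map]
  rw [hsplit, List.foldl_cons]
  have h1 := finalStep_eval a ha _ _ (fun i hi => ftbl i hi) hlT 0 hn none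
  rw [← hpre0] at h1
  rw [h1]
  have hmem : ∀ k ∈ (List.range t).map Nat.succ, k < a.length := by
    intro k hk
    obtain ⟨s, hs, rfl⟩ := List.mem_map.mp hk
    rw [List.mem_range] at hs
    omega
  have h2 := foldFinal a ha _ _ (fun i hi => ftbl i hi) hlT ((List.range t).map Nat.succ) hmem
    (cand a 0)
  rw [← hpre0] at h2
  rw [h2]
  rw [List.foldl_map, List.foldl_map]

-- ===== VERDICT (by name: the statement is the Claim_ definition above) =====
theorem find_max_min_product_spec : Claim_equal_find_max_min_product := by
  intro numbers _ hpre
  unfold Spec_find_max_min_product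
  have hne : numbers ≠ [] := hpre
  obtain ⟨t, hm⟩ : ∃ t, numbers.length = t + 1 :=
    ⟨numbers.length - 1, by have := List.length_pos_iff.mpr hne; omega⟩
  rw [a_eq numbers t hm, alt_eq numbers t hm]
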